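-- pv_equiv track=rewrite | github.com/RTH-tools/crisprroots | scripts/8_check_KI.py | str_get_pielup_stats
-- ===== SOURCE A (Python) =====
-- def str_get_pielup_stats(int_nreads: int, str_nt: str, mutation: str):
--     str_nt_no_indel = []
--     int_indels = 0
--     i = 0
--     while i < len(str_nt):
--         nt = str_nt[i]
--         if nt != '+' and nt != '-' and nt != '$' and nt != '^':
--             str_nt_no_indel.append(nt)
--         else:
--             if nt == '+' or nt == '-':
--                 int_indels += 1
--                 int_skipped_poss = int(
--                     str_nt[i + 1])  # this number will say how many positions we need to remove from the pileup
--                 i = i + int_skipped_poss + 1  # +1 for skipping the number of indels (eg. +4ATTA)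
--                 str_nt_no_indel = str_nt_no_indel[
--                                   :-1]  # remove lats character of str_nt_no_indel, because it is connected with the indel event
--         i += 1
--     int_mutations = len([nt for nt in str_nt_no_indel if nt.upper() == mutation])
--     lst_other_mutations = ['A', 'T', 'G', 'C']  # Do not consider N (unknown nt in read) as a possible mutation
--     if mutation != '<>' and mutation != 'N':
--         lst_other_mutations.remove(mutation)
--     int_other_events = len([nt for nt in str_nt_no_indel if nt.upper() in lst_other_mutations]) + int_indels
--     int_skip = len([nt for nt in str_nt_no_indel if nt == '>' or nt == '<'])
--     if mutation != '<>':
--         stats = 'Ref=%i; %s=%i; Skip=%i; Other=%i; \n%s' % \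
--                 (int_nreads - int_other_events - int_mutations - int_skip, mutation, int_mutations, int_skip,
--                  int_other_events, str_nt)
--     else:
--         stats = 'Ref=%i; Skip=%i; \n%s' % \
--                 (int_nreads - int_other_events - int_mutations - int_skip, int_skip, str_nt)
--     return stats
-- ===== SOURCE B (Python) =====
-- def str_get_pielup_stats(int_nreads: int, str_nt: str, mutation: str):
--     # One pass: classify each accepted character immediately into a bucket
--     # (1=mutation, 2=other nucleotide, 3=skip, 0=none), keep running counters
--     # and a stack of bucket labels so an indel event can undo exactly the
--     # character it is attached to. No post-scan filtering passes.
--     lst_other_mutations = ['A', 'T', 'G', 'C']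
--     if mutation != '<>' and mutation != 'N':
--         lst_other_mutations.remove(mutation)
--
--     def classify(nt):
--         u = nt.upper()
--         if u == mutation:
--             return 1
--         if u in lst_other_mutations:
--             return 2
--         if nt == '>' or nt == '<':
--             return 3
--         return 0
--
--     int_mutations = 0
--     int_other = 0
--     int_skip = 0
--     int_indels = 0
--     stack = []
--     i = 0
--     n = len(str_nt)
--     while i < n:
--         nt = str_nt[i]
--         if nt != '+' and nt != '-' and nt != '$' and nt != '^':
--             b = classify(nt)
--             stack.append(b)
--             if b == 1:
--                 int_mutations += 1
--             elif b == 2: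
--                 int_other += 1
--             elif b == 3:
--                 int_skip += 1
--             i += 1
--         elif nt == '+' or nt == '-':
--             int_indels += 1
--             d = int(str_nt[i + 1])  # single-digit skip count, as in the original
--             if stack:
--                 b = stack.pop()
--                 if b == 1:
--                     int_mutations -= 1
--                 elif b == 2:
--                     int_other -= 1
--                 elif b == 3:
--                     int_skip -= 1
--             i += d + 2
--         else:  # '$' or '^' are no-ops
--             i += 1
--
--     int_other_events = int_other + int_indels
--     if mutation != '<>':
--         return 'Ref=%i; %s=%i; Skip=%i; Other=%i; \n%s' % \
--             (int_nreads - int_other_events - int_mutations - int_skip, mutation,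
--              int_mutations, int_skip, int_other_events, str_nt)
--     else:
--         return 'Ref=%i; Skip=%i; \n%s' % \
--             (int_nreads - int_other_events - int_mutations - int_skip, int_skip, str_nt)
-- ===== Notes on version B (the rewrite author's own statement) =====
-- stated objective: alternative
-- what changed: B replaces A's build-a-filtered-character-list-then-three-filtering-passes with a single pass that classifies each accepted character immediately into running counters, keeping a stack of bucket labels so an indel decrements exactly the bucket of the character it removes.
import Mathlib
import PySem

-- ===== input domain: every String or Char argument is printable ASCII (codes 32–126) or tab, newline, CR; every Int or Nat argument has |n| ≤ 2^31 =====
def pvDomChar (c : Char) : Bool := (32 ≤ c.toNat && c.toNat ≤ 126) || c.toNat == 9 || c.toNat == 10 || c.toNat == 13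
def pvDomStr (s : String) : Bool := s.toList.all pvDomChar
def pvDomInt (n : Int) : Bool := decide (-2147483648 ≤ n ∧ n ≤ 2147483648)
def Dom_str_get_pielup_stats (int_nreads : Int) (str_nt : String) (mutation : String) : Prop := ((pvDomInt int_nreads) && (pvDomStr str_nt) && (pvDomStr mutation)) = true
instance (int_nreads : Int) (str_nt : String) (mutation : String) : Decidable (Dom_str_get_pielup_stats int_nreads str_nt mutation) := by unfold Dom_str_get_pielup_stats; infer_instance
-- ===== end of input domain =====

-- B keeps one scan with running counters and a stack of bucket labels instead of
-- building the filtered character list and scanning it three times (objective: alternative).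

-- ===== PORT A =====

-- int(str_nt[i+1]) of a single character: exact (some 0..9) on digit chars, where Python returns;
-- on a missing or non-digit character Python raises (IndexError/ValueError) — excluded by Pre_ — and we default to 0.
def pvDigitA (oc : Option Char) : Nat :=
  match oc with
  | some c => match PySem.Int.ofChars? [c] with
    | some k => k.toNat
    | none => 0
  | none => 0

-- the while loop of A: gas = str length (i strictly increases each iteration, so this is the exact loop)
def pvLoopA (s : List Char) : Nat → Nat → List Char → Int → List Char × Int
  | 0, _, acc, ind => (acc, ind)
  | gas + 1, i, acc, ind =>
    match s[i]? with
    | none => (acc, ind)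
    | some nt =>
      if nt ≠ '+' ∧ nt ≠ '-' ∧ nt ≠ '$' ∧ nt ≠ '^' then
        pvLoopA s gas (i + 1) (acc ++ [nt]) ind
      else if nt = '+' ∨ nt = '-' then
        pvLoopA s gas (i + pvDigitA s[i+1]? + 2) acc.dropLast (ind + 1)
      else
        pvLoopA s gas (i + 1) acc ind

-- lst_other_mutations after the conditional remove; .getD covers the ValueError case (excluded by Pre_)
def pvOtherList (mu : List Char) : List (List Char) :=
  if mu ≠ ['<', '>'] ∧ mu ≠ ['N'] then
    (PySem.List.remove? [['A'], ['T'], ['G'], ['C']] mu).getD [['A'], ['T'], ['G'], ['C']]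
  else [['A'], ['T'], ['G'], ['C']]

def str_get_pielup_stats (int_nreads : Int) (str_nt : String) (mutation : String) : String :=
  let s := str_nt.toList
  let mu := mutation.toList
  let r := pvLoopA s s.length 0 [] 0
  let acc := r.1
  let int_indels := r.2
  let int_mutations : Int := (acc.filter (fun nt => [PySem.Chars.upperChar nt] == mu)).length
  let lst := pvOtherList mu
  let int_other_events : Int := ((acc.filter (fun nt => lst.contains [PySem.Chars.upperChar nt])).length : Int) + int_indels
  let int_skip : Int := (acc.filter (fun nt => nt == '>' || nt == '<')).length
  if mu ≠ ['<', '>'] then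
    String.mk ("Ref=".toList ++ PySem.Int.toChars (int_nreads - int_other_events - int_mutations - int_skip)
      ++ "; ".toList ++ mu ++ "=".toList ++ PySem.Int.toChars int_mutations
      ++ "; Skip=".toList ++ PySem.Int.toChars int_skip
      ++ "; Other=".toList ++ PySem.Int.toChars int_other_events ++ "; \n".toList ++ s)
  else
    String.mk ("Ref=".toList ++ PySem.Int.toChars (int_nreads - int_other_events - int_mutations - int_skip)
      ++ "; Skip=".toList ++ PySem.Int.toChars int_skip ++ "; \n".toList ++ s)

-- ===== PORT B =====

-- bucket of a character: 1 = mutation, 2 = other nucleotide, 3 = skip, 0 = none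
def pvClassify (mu : List Char) (lst : List (List Char)) (nt : Char) : Nat :=
  if [PySem.Chars.upperChar nt] == mu then 1
  else if lst.contains [PySem.Chars.upperChar nt] then 2
  else if nt == '>' || nt == '<' then 3
  else 0

-- the single-pass loop of B: running counters plus a stack of bucket labels
def pvLoopB (s : List Char) (mu : List Char) (lst : List (List Char)) :
    Nat → Nat → Int → Int → Int → Int → List Nat → Int × Int × Int × Int
  | 0, _, cm, co, cs, ind, _ => (cm, co, cs, ind)
  | gas + 1, i, cm, co, cs, ind, stack =>
    match s[i]? with
    | none => (cm, co, cs, ind)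
    | some nt =>
      if nt ≠ '+' ∧ nt ≠ '-' ∧ nt ≠ '$' ∧ nt ≠ '^' then
        let b := pvClassify mu lst nt
        pvLoopB s mu lst gas (i + 1)
          (if b = 1 then cm + 1 else cm) (if b = 2 then co + 1 else co)
          (if b = 3 then cs + 1 else cs) ind (b :: stack)
      else if nt = '+' ∨ nt = '-' then
        match stack with
        | [] => pvLoopB s mu lst gas (i + pvDigitA s[i+1]? + 2) cm co cs (ind + 1) []
        | b :: rest =>
          pvLoopB s mu lst gas (i + pvDigitA s[i+1]? + 2)
            (if b = 1 then cm - 1 else cm) (if b = 2 then co - 1 else co)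
            (if b = 3 then cs - 1 else cs) (ind + 1) rest
      else
        pvLoopB s mu lst gas (i + 1) cm co cs ind stack

def str_get_pielup_stats_alt (int_nreads : Int) (str_nt : String) (mutation : String) : String :=
  let s := str_nt.toList
  let mu := mutation.toList
  let lst := pvOtherList mu
  let r := pvLoopB s mu lst s.length 0 0 0 0 0 []
  let int_mutations := r.1
  let int_skip := r.2.2.1
  let int_other_events := r.2.1 + r.2.2.2
  if mu ≠ ['<', '>'] then
    String.mk ("Ref=".toList ++ PySem.Int.toChars (int_nreads - int_other_events - int_mutations - int_skip)
      ++ "; ".toList ++ mu ++ "=".toList ++ PySem.Int.toChars int_mutations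
      ++ "; Skip=".toList ++ PySem.Int.toChars int_skip
      ++ "; Other=".toList ++ PySem.Int.toChars int_other_events ++ "; \n".toList ++ s)
  else
    String.mk ("Ref=".toList ++ PySem.Int.toChars (int_nreads - int_other_events - int_mutations - int_skip)
      ++ "; Skip=".toList ++ PySem.Int.toChars int_skip ++ "; \n".toList ++ s)

-- ===== PRECONDITION & SPEC =====
-- A raises unless mutation is one of the six values list.remove/format admit, and raises
-- IndexError/ValueError when an examined '+'/'-' is not followed by a digit; the digit condition is
-- stated for EVERY '+'/'-' position, which is slightly narrower than A's scan (a sign lying inside a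
-- skipped run is never examined) — on such inputs A returns and B returns the same value (see cites).
def Pre_str_get_pielup_stats (int_nreads : Int) (str_nt : String) (mutation : String) : Prop :=
  (mutation = "A" ∨ mutation = "T" ∨ mutation = "G" ∨ mutation = "C" ∨ mutation = "N" ∨ mutation = "<>") ∧
  ∀ i < str_nt.toList.length,
    (str_nt.toList.getD i ' ' = '+' ∨ str_nt.toList.getD i ' ' = '-') →
    (i + 1 < str_nt.toList.length ∧ PySem.Chars.isdigit (str_nt.toList.getD (i+1) ' ') = true)
instance (int_nreads : Int) (str_nt : String) (mutation : String) : Decidable (Pre_str_get_pielup_stats int_nreads str_nt mutation) := by unfold Pre_str_get_pielup_stats; infer_instance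

def pvWitness_str_get_pielup_stats : Int × String × String := (10, "AaT<>^$G.n", "A")

def Spec_str_get_pielup_stats (int_nreads : Int) (str_nt : String) (mutation : String) (out : String) : Prop := out = str_get_pielup_stats_alt int_nreads str_nt mutation
instance (int_nreads : Int) (str_nt : String) (mutation : String) (out : String) : Decidable (Spec_str_get_pielup_stats int_nreads str_nt mutation out) := by unfold Spec_str_get_pielup_stats; infer_instance

-- ===== CLAIM (what is proved, stated in full; the proofs are below) =====
def Claim_equal_str_get_pielup_stats : Prop := ∀ (int_nreads : Int) (str_nt : String) (mutation : String), Dom_str_get_pielup_stats int_nreads str_nt mutation → Pre_str_get_pielup_stats int_nreads str_nt mutation → Spec_str_get_pielup_stats int_nreads str_nt mutation (str_get_pielup_stats int_nreads str_nt mutation)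

-- ===== LEMMAS AND PROOFS =====
lemma pvCnt_push (f : Char → Bool) (acc : List Char) (nt : Char) (cm : Int)
    (h : cm = (acc.countP f : Int)) :
    (if f nt = true then cm + 1 else cm) = (((acc ++ [nt]).countP f : Nat) : Int) := by
  subst h; simp [List.countP_append, List.countP_cons]; split_ifs <;> simp

lemma pvCnt_pop (f : Char → Bool) (l' : List Char) (a : Char) :
    (if f a = true then (((l' ++ [a]).countP f : Nat) : Int) - 1 else ((l' ++ [a]).countP f : Nat)) = ((l'.countP f : Nat) : Int) := by
  simp [List.countP_append, List.countP_cons]; split_ifs <;> simp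

lemma pvSim (s mu : List Char) (lst : List (List Char)) :
    ∀ (gas i : Nat) (acc : List Char) (ind : Int),
    pvLoopB s mu lst gas i
      ((acc.countP (fun c => pvClassify mu lst c == 1) : Nat) : Int)
      ((acc.countP (fun c => pvClassify mu lst c == 2) : Nat) : Int)
      ((acc.countP (fun c => pvClassify mu lst c == 3) : Nat) : Int)
      ind ((acc.map (pvClassify mu lst)).reverse)
    = ((((pvLoopA s gas i acc ind).1.countP (fun c => pvClassify mu lst c == 1) : Nat) : Int),
       (((pvLoopA s gas i acc ind).1.countP (fun c => pvClassify mu lst c == 2) : Nat) : Int),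
       (((pvLoopA s gas i acc ind).1.countP (fun c => pvClassify mu lst c == 3) : Nat) : Int),
       (pvLoopA s gas i acc ind).2) := by
  intro gas
  induction gas with
  | zero => intro i acc ind; simp [pvLoopA, pvLoopB]
  | succ g ih =>
    intro i acc ind
    simp only [pvLoopA, pvLoopB]
    cases hnt : s[i]? with
    | none => simp
    | some nt =>
      by_cases hn : nt ≠ '+' ∧ nt ≠ '-' ∧ nt ≠ '$' ∧ nt ≠ '^'
      · simp only [if_pos hn]
        have e1 := pvCnt_push (fun c => pvClassify mu lst c == 1) acc nt _ rfl
        have e2 := pvCnt_push (fun c => pvClassify mu lst c == 2) acc nt _ rfl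
        have e3 := pvCnt_push (fun c => pvClassify mu lst c == 3) acc nt _ rfl
        simp only [beq_iff_eq] at e1 e2 e3
        rw [show (pvClassify mu lst nt :: (acc.map (pvClassify mu lst)).reverse)
              = ((acc ++ [nt]).map (pvClassify mu lst)).reverse from by simp,
            e1, e2, e3] -- ??? shape
        exact ih (i+1) (acc ++ [nt]) ind
      · simp only [if_neg hn]
        by_cases hpm : nt = '+' ∨ nt = '-'
        · simp only [if_pos hpm]
          rcases acc.eq_nil_or_concat with hacc | ⟨l', a, hacc⟩ <;> subst hacc
          · exact ih (i + pvDigitA s[i+1]? + 2) [] (ind + 1)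
          · simp only [List.concat_eq_append, List.map_append, List.map_cons, List.map_nil, List.reverse_append,
              List.reverse_cons, List.reverse_nil, List.nil_append, List.cons_append,
              List.dropLast_concat]
            have e1 := pvCnt_pop (fun c => pvClassify mu lst c == 1) l' a
            have e2 := pvCnt_pop (fun c => pvClassify mu lst c == 2) l' a
            have e3 := pvCnt_pop (fun c => pvClassify mu lst c == 3) l' a
            simp only [beq_iff_eq] at e1 e2 e3
            rw [e1, e2, e3]
            exact ih (i + pvDigitA s[i+1]? + 2) l' (ind + 1)
        · simp only [if_neg hpm]
          exact ih (i+1) acc ind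

lemma pvCls1 (mu : List Char) (lst : List (List Char)) (c : Char) :
    (pvClassify mu lst c == 1) = ([PySem.Chars.upperChar c] == mu) := by
  unfold pvClassify; split_ifs with h1 h2 h3 <;> simp_all

lemma pvMuCases (mu : List Char)
    (hmu : mu = ['A'] ∨ mu = ['T'] ∨ mu = ['G'] ∨ mu = ['C'] ∨ mu = ['N'] ∨ mu = ['<', '>']) (c : Char) :
    ((pvClassify mu (pvOtherList mu) c == 2) = (pvOtherList mu).contains [PySem.Chars.upperChar c]) ∧
    ((pvClassify mu (pvOtherList mu) c == 3) = (c == '>' || c == '<')) := by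
  rcases hmu with rfl | rfl | rfl | rfl | rfl | rfl <;>
    · by_cases hgt : c = '>'
      · subst hgt; constructor <;> decide
      · by_cases hlt : c = '<'
        · subst hlt; constructor <;> decide
        · unfold pvClassify
          split_ifs with h1 h2 h3 <;> simp_all <;> decide

-- ===== VERDICT (by name: the statement is the Claim_ definition above) =====
theorem str_get_pielup_stats_spec : Claim_equal_str_get_pielup_stats := by
  intro n snt m _ hpre
  obtain ⟨hm, -⟩ := hpre
  have hmu : m.toList = ['A'] ∨ m.toList = ['T'] ∨ m.toList = ['G'] ∨ m.toList = ['C'] ∨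
      m.toList = ['N'] ∨ m.toList = ['<', '>'] := by
    rcases hm with rfl | rfl | rfl | rfl | rfl | rfl <;> decide
  show str_get_pielup_stats n snt m = str_get_pielup_stats_alt n snt m
  have hsim := pvSim snt.toList m.toList (pvOtherList m.toList) snt.toList.length 0 [] 0
  simp only [List.countP_nil, Nat.cast_zero, List.map_nil, List.reverse_nil] at hsim
  have h1 : ∀ acc : List Char,
      acc.countP (fun c => pvClassify m.toList (pvOtherList m.toList) c == 1)
        = acc.countP (fun c => [PySem.Chars.upperChar c] == m.toList) :=
    fun acc => List.countP_congr (fun c _ => by rw [pvCls1 m.toList (pvOtherList m.toList) c])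
  have h2 : ∀ acc : List Char,
      acc.countP (fun c => pvClassify m.toList (pvOtherList m.toList) c == 2)
        = acc.countP (fun c => (pvOtherList m.toList).contains [PySem.Chars.upperChar c]) :=
    fun acc => List.countP_congr (fun c _ => by rw [(pvMuCases m.toList hmu c).1])
  have h3 : ∀ acc : List Char,
      acc.countP (fun c => pvClassify m.toList (pvOtherList m.toList) c == 3)
        = acc.countP (fun c => c == '>' || c == '<') :=
    fun acc => List.countP_congr (fun c _ => by rw [(pvMuCases m.toList hmu c).2])
  simp only [str_get_pielup_stats, str_get_pielup_stats_alt, hsim, h1, h2, h3,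
    ← List.countP_eq_length_filter]
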